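/- GENERATED by mk_final_copies.py from the proof of the farm's unit `start_decoder.C14b` (farm:start_decoder.C14b.1: Proof.lean) as the
   re-elaboration sweep compiled it — do not edit. -/
import Vorbis.Spec.Units.start_decoder_C14b
import Vorbis.Spec.Worked.start_decoder_C14b_Lemmas

open X86 X86.User Asan Vorbis Vorbis.Spec Vorbis.Spec.StartDecoder

/-- Segment C14b of `start_decoder`: the three walks of `Lemmas.lean` glued by `ReachVia.trans` — `c14b_head` (0x1150ca → the loop
head 0x115129 with `j = 0`, or 0x1150fc on the NULL arm), `c14b_free` (→ 0x11510f, the return of `setup_temp_free`), `c14b_err`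
(→ the epilogue 0x113b22 after `error(f, VORBIS_outofmem)`). -/
theorem Vorbis.Spec.Worked.start_decoder_C14b_ok : Vorbis.Spec.start_decoder_C14b.Statement := by
  intro Lay hLay μ hμ u₀ hcode h_store8 h_load4 h_free h_error
  intro g i v hat
  obtain ⟨A, mults, A2, A3, Ai, Am, h⟩ := hat
  -- 0x1150ca (stb_vorbis_fixed.c:3935): the store `c->multiplicands`, the NULL test
  refine (Vorbis.Spec.start_decoder_C14b.c14b_head Lay hLay μ hμ u₀ hcode h_store8 h_load4 g i A2 A3 Ai Am A mults v h).trans ?_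
  intro v1 h1
  rcases h1 with hloop | hfail
  · -- 0x115129 (line 3937): the loop head with `j = 0`
    exact ReachVia.done (Or.inl hloop)
  · -- 0x1150fc (line 3936): `setup_temp_free(f, mults, 2·LV)`
    refine (Vorbis.Spec.start_decoder_C14b.c14b_free Lay hLay μ hμ u₀ hcode h_free g i A2 A3 Ai A mults v1 hfail).trans ?_
    intro v2 h2
    obtain ⟨A', hfreed⟩ := h2
    -- 0x11510f (line 3936): `return error(f, VORBIS_outofmem)`
    exact (Vorbis.Spec.start_decoder_C14b.c14b_err Lay hLay μ hμ u₀ hcode h_error g i A2 A3 Ai A' v2 hfreed).mono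
      (fun w hw => Or.inr hw)
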